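-- pv_equiv track=rewrite | github.com/Abdulrahman-lab/grade-phoenix-bot | bot/core.py | _compare_grades
-- ===== SOURCE A (Python) =====
-- from typing import Dict, List
--
-- def _compare_grades(old_grades: List[Dict], new_grades: List[Dict]) -> List[Dict]:
--     """
--     Return only courses where important fields (total, coursework, final_exam) changed.
--     """
--     def extract_relevant(grade):
--         return {
--             'code': grade.get('code') or grade.get('name'),
--             'total': grade.get('total'),
--             'coursework': grade.get('coursework'),
--             'final_exam': grade.get('final_exam'),
--         }
--     old_map = {g.get('code') or g.get('name'): extract_relevant(g) for g in old_grades if g.get('code') or g.get('name')}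
--     changed = []
--     for new_grade in new_grades:
--         key = new_grade.get('code') or new_grade.get('name')
--         if not key:
--             continue
--         relevant_new = extract_relevant(new_grade)
--         relevant_old = old_map.get(key)
--         if relevant_old is None or relevant_new != relevant_old:
--             changed.append(new_grade)
--     return changed
-- ===== SOURCE B (Python) =====
-- def _compare_grades(old_grades, new_grades):
--     """
--     Return only courses where important fields (total, coursework, final_exam) changed.
--     No key->grade map is built: each new grade scans old_grades from the back for
--     the last old grade sharing its key (matching dict-overwrite semantics).
--     """
--     def key(g):
--         return g.get('code') or g.get('name')
--
--     def relevant(g):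
--         return (key(g), g.get('total'), g.get('coursework'), g.get('final_exam'))
--
--     changed = []
--     for new_grade in new_grades:
--         k = key(new_grade)
--         if not k:
--             continue
--         for old_grade in reversed(old_grades):
--             if key(old_grade) == k:
--                 if relevant(new_grade) != relevant(old_grade):
--                     changed.append(new_grade)
--                 break
--         else:
--             changed.append(new_grade)
--     return changed
-- ===== Notes on version B (the rewrite author's own statement) =====
-- stated objective: alternative
-- what changed: B drops the old_map dictionary entirely: for each new grade it scans old_grades from the back for the last old grade with the same key (matching dict-overwrite semantics) and compares the relevant-field tuples directly.
import Mathlib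
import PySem

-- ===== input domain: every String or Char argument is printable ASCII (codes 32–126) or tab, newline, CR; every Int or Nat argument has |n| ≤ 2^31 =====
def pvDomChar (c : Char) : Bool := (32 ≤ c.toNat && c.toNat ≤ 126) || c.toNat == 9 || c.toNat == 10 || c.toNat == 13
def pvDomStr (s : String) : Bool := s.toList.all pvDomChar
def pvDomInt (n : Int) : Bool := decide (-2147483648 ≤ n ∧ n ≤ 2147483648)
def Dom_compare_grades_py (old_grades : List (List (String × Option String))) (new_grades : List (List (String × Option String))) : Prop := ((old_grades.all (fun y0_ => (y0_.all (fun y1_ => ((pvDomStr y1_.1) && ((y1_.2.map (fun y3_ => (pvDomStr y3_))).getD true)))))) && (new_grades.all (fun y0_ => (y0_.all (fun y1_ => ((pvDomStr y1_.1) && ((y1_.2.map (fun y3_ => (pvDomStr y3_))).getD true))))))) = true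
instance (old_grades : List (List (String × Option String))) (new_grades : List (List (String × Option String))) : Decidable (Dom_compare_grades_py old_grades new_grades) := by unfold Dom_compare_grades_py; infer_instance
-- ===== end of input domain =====

-- B is an alternative decomposition: it builds no old_map and instead scans old_grades
-- backwards per new grade; same return value, no speed claim.

-- ===== PORT A =====
-- g.get(k): first match in the association list (a Python dict has unique keys);
-- a stored None and a missing key both read back as none, exactly like Python's .get.
def pvGet (g : List (String × Option String)) (k : String) : Option String :=
  match g.find? (fun p => p.1 == k) with
  | none => none
  | some p => p.2

-- Python truthiness of a str-or-None value
def pvTruthy (o : Option String) : Bool :=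
  match o with
  | none => false
  | some s => !(s == "")

-- g.get('code') or g.get('name')
def pvKey (g : List (String × Option String)) : Option String :=
  if pvTruthy (pvGet g "code") then pvGet g "code" else pvGet g "name"

-- extract_relevant(grade): a dict literal with the four fixed keys
def pvExtract (g : List (String × Option String)) : PySem.Dict String (Option String) :=
  PySem.Dict.ofList [("code", pvKey g), ("total", pvGet g "total"),
                     ("coursework", pvGet g "coursework"), ("final_exam", pvGet g "final_exam")]

-- the dict comprehension building old_map (a duplicate key overwrites: last wins)
def pvOldMap (old_grades : List (List (String × Option String))) :
    PySem.Dict String (PySem.Dict String (Option String)) :=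
  old_grades.foldl
    (fun d g =>
      match pvKey g with
      | none => d
      | some k => if k == "" then d else d.insert k (pvExtract g))
    PySem.Dict.empty

def compare_grades_py (old_grades : List (List (String × Option String))) (new_grades : List (List (String × Option String))) : List (List (String × Option String)) :=
  let old_map := pvOldMap old_grades
  new_grades.foldl
    (fun changed new_grade =>
      match pvKey new_grade with
      | none => changed
      | some k =>
        if k == "" then changed
        else
          let relevant_new := pvExtract new_grade
          match old_map.get? k with
          | none => changed ++ [new_grade]
          | some relevant_old =>
            if relevant_new = relevant_old then changed else changed ++ [new_grade])
    []

-- ===== PORT B =====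
-- relevant(g): the four compared fields, as a tuple
def pvRelevant (g : List (String × Option String)) :
    Option String × Option String × Option String × Option String :=
  (pvKey g, pvGet g "total", pvGet g "coursework", pvGet g "final_exam")

def compare_grades_py_alt (old_grades : List (List (String × Option String))) (new_grades : List (List (String × Option String))) : List (List (String × Option String)) :=
  new_grades.foldl
    (fun changed new_grade =>
      match pvKey new_grade with
      | none => changed
      | some k =>
        if k == "" then changed
        else
          match old_grades.reverse.find? (fun og => pvKey og == some k) with
          | none => changed ++ [new_grade]
          | some old_grade =>
            if pvRelevant new_grade = pvRelevant old_grade then changed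
            else changed ++ [new_grade])
    []

-- ===== PRECONDITION & SPEC =====
def Spec_compare_grades_py (old_grades : List (List (String × Option String))) (new_grades : List (List (String × Option String))) (out : List (List (String × Option String))) : Prop := out = compare_grades_py_alt old_grades new_grades
instance (old_grades : List (List (String × Option String))) (new_grades : List (List (String × Option String))) (out : List (List (String × Option String))) : Decidable (Spec_compare_grades_py old_grades new_grades out) := by unfold Spec_compare_grades_py; infer_instance

-- ===== CLAIM (what is proved, stated in full; the proofs are below) =====
def Claim_equal_compare_grades_py : Prop := ∀ (old_grades : List (List (String × Option String))) (new_grades : List (List (String × Option String))), Dom_compare_grades_py old_grades new_grades → Spec_compare_grades_py old_grades new_grades (compare_grades_py old_grades new_grades)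

-- ===== LEMMAS AND PROOFS =====

-- pvExtract is the literal four-entry dict (the four keys are distinct)
lemma pvExtract_mk (g : List (String × Option String)) :
    pvExtract g = PySem.Dict.mk [("code", pvKey g), ("total", pvGet g "total"),
                     ("coursework", pvGet g "coursework"), ("final_exam", pvGet g "final_exam")] := rfl

-- A's projection dicts are equal iff B's projection tuples are
lemma extract_eq_iff (g g' : List (String × Option String)) :
    pvExtract g = pvExtract g' ↔ pvRelevant g = pvRelevant g' := by
  rw [pvExtract_mk, pvExtract_mk, PySem.Dict.ext_iff]
  simp [pvRelevant, Prod.ext_iff]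

-- old_map lookup = the last old grade with this (truthy) key = backwards first match
lemma foldl_insert_get (l : List (List (String × Option String)))
    (d : PySem.Dict String (PySem.Dict String (Option String))) (k : String)
    (hk : (k == "") = false) :
    (l.foldl
      (fun d g =>
        match pvKey g with
        | none => d
        | some k' => if k' == "" then d else d.insert k' (pvExtract g)) d).get? k =
      ((l.reverse.find? (fun og => pvKey og == some k)).map pvExtract).or (d.get? k) := by
  induction l generalizing d with
  | nil => simp
  | cons g rest ih =>
    simp only [List.foldl_cons, List.reverse_cons, List.find?_append, ih]
    cases hfind : rest.reverse.find? (fun og => pvKey og == some k) with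
    | some og => simp
    | none =>
      simp only [Option.map_none, Option.none_or]
      cases hkey : pvKey g with
      | none => simp [List.find?, hkey]
      | some k' =>
        by_cases hke : k' = k
        · subst hke
          simp [List.find?, hkey, hk, PySem.Dict.get?_insert_self]
        · have hbe : (k' == k) = false := beq_eq_false_iff_ne.mpr hke
          simp only [List.find?, hkey, Option.some_beq_some, hbe, Option.map_none,
            Option.none_or]
          split
          · rfl
          · exact PySem.Dict.get?_insert_of_ne _ _ (fun h => hke h.symm)

lemma oldMap_get (old_grades : List (List (String × Option String))) (k : String)
    (hk : (k == "") = false) :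
    (pvOldMap old_grades).get? k =
      (old_grades.reverse.find? (fun og => pvKey og == some k)).map pvExtract := by
  rw [pvOldMap, foldl_insert_get _ _ _ hk]
  simp

-- ===== VERDICT (by name: the statement is the Claim_ definition above) =====
theorem compare_grades_py_spec : Claim_equal_compare_grades_py := by
  intro old_grades new_grades _
  unfold Spec_compare_grades_py compare_grades_py compare_grades_py_alt
  -- zeta-reduce the two lets of A's port (definitional)
  show new_grades.foldl
      (fun changed new_grade =>
        match pvKey new_grade with
        | none => changed
        | some k =>
          if k == "" then changed
          else
            match (pvOldMap old_grades).get? k with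
            | none => changed ++ [new_grade]
            | some relevant_old =>
              if pvExtract new_grade = relevant_old then changed
              else changed ++ [new_grade]) [] = _
  have hstep :
      (fun (changed : List (List (String × Option String))) new_grade =>
        match pvKey new_grade with
        | none => changed
        | some k =>
          if k == "" then changed
          else
            match (pvOldMap old_grades).get? k with
            | none => changed ++ [new_grade]
            | some relevant_old =>
              if pvExtract new_grade = relevant_old then changed
              else changed ++ [new_grade]) =
      (fun (changed : List (List (String × Option String))) new_grade =>
        match pvKey new_grade with
        | none => changed
        | some k =>
          if k == "" then changed
          else
            match old_grades.reverse.find? (fun og => pvKey og == some k) with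
            | none => changed ++ [new_grade]
            | some old_grade =>
              if pvRelevant new_grade = pvRelevant old_grade then changed
              else changed ++ [new_grade]) := by
    funext changed g
    cases hkey : pvKey g with
    | none => rfl
    | some k =>
      by_cases hk : (k == "") = true
      · simp [hk]
      · rw [Bool.not_eq_true] at hk
        simp only [hk, Bool.false_eq_true, if_false, oldMap_get old_grades k hk]
        cases hfind : old_grades.reverse.find? (fun og => pvKey og == some k) with
        | none => rfl
        | some og => simp [extract_eq_iff]
  rw [hstep]
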